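-- pv_equiv track=rewrite | github.com/Midoelafreet/zen-ticks-trading | The Zen Ticks (1).py | calculate_streak_stats
-- ===== SOURCE A (Python) =====
-- from typing import Tuple, List
--
-- def calculate_streak_stats(trades: List[bool]) -> dict:
--     current_streak = 0
--     current_type = None
--     streaks = {'winning': [], 'losing': []}
--
--     for trade in trades:
--         if current_type is None:
--             current_type = trade
--             current_streak = 1
--         elif trade == current_type:
--             current_streak += 1
--         else:
--             if current_type:
--                 streaks['winning'].append(current_streak)
--             else:
--                 streaks['losing'].append(current_streak)
--             current_type = trade
--             current_streak = 1
--
--     # Add the last streak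
--     if current_type is not None:
--         if current_type:
--             streaks['winning'].append(current_streak)
--         else:
--             streaks['losing'].append(current_streak)
--
--     return streaks
-- ===== SOURCE B (Python) =====
-- from typing import List
--
--
-- def calculate_streak_stats(trades: List[bool]) -> dict:
--     n = len(trades)
--     # staged passes: run-start boundaries first, then lengths as index differences
--     bounds = [i for i in range(n) if i == 0 or trades[i] != trades[i - 1]]
--     bounds.append(n)
--     runs = list(zip(bounds, bounds[1:]))
--     return {'winning': [e - s for s, e in runs if trades[s]],
--             'losing': [e - s for s, e in runs if not trades[s]]}
-- ===== Notes on version B (the rewrite author's own statement) =====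
-- stated objective: alternative
-- what changed: Replaces A's one-pass current_streak/current_type state machine (with its final-flush special case) by staged passes: first build the list of run-start boundary indices by comparing each element with its predecessor, append len(trades), then read each streak length off as the difference of consecutive boundaries and route it by the element at the run's start.
import Mathlib
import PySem

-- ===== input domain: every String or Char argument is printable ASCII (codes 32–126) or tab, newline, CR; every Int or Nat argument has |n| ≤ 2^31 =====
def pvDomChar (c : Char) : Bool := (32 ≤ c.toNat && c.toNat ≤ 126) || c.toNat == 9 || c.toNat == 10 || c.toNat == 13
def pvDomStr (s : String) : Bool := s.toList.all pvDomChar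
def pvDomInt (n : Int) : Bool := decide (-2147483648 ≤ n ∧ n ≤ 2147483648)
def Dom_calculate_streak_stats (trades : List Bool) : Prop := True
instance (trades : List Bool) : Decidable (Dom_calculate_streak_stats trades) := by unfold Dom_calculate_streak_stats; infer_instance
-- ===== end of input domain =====

-- B replaces A's one-pass streak state machine by staged passes: first the list of run-start
-- indices (comparing each element with its predecessor), then run lengths as differences of
-- consecutive boundaries; same O(n) cost, a different decomposition.

-- ===== PORT A =====
-- the for-loop of A over `trades`, carrying (current_streak, current_type, winning, losing);
-- the [] case performs A's final "add the last streak" flush.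
def csLoopA : List Bool → Int → Option Bool → List Int → List Int → List Int × List Int
  | [], cs, ct, w, l =>
    match ct with
    | none => (w, l)
    | some b => if b then (w ++ [cs], l) else (w, l ++ [cs])
  | t :: ts, cs, ct, w, l =>
    match ct with
    | none => csLoopA ts 1 (some t) w l
    | some b =>
      if t == b then csLoopA ts (cs + 1) (some b) w l
      else if b then csLoopA ts 1 (some t) (w ++ [cs]) l
      else csLoopA ts 1 (some t) w (l ++ [cs])

def calculate_streak_stats (trades : List Bool) : List (String × List Int) :=
  let r := csLoopA trades 0 none [] []
  [("winning", r.1), ("losing", r.2)]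

-- ===== PORT B =====
-- bounds = [i for i in range(n) if i == 0 or trades[i] != trades[i - 1]] (+ the appended n).
-- Every index used (i, i-1 behind the short-circuit, and s below) is in range, so pyGetD with
-- default false is exact for Python's trades[...] here.
def bStarts (trades : List Bool) : List Int :=
  (PySem.List.pyRange 0 (trades.length : Int)).filter
    (fun i => i == 0 || !(PySem.List.pyGetD trades i false == PySem.List.pyGetD trades (i - 1) false))

def bBounds (trades : List Bool) : List Int := bStarts trades ++ [(trades.length : Int)]

-- runs = list(zip(bounds, bounds[1:]))
def bRuns (trades : List Bool) : List (Int × Int) := (bBounds trades).zip (bBounds trades).tail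

def calculate_streak_stats_alt (trades : List Bool) : List (String × List Int) :=
  [("winning", ((bRuns trades).filter (fun p => PySem.List.pyGetD trades p.1 false)).map (fun p => p.2 - p.1)),
   ("losing",  ((bRuns trades).filter (fun p => !PySem.List.pyGetD trades p.1 false)).map (fun p => p.2 - p.1))]

-- ===== PRECONDITION & SPEC =====
def Spec_calculate_streak_stats (trades : List Bool) (out : List (String × List Int)) : Prop := out = calculate_streak_stats_alt trades
instance (trades : List Bool) (out : List (String × List Int)) : Decidable (Spec_calculate_streak_stats trades out) := by unfold Spec_calculate_streak_stats; infer_instance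

-- ===== CLAIM (what is proved, stated in full; the proofs are below) =====
def Claim_equal_calculate_streak_stats : Prop := ∀ (trades : List Bool), Dom_calculate_streak_stats trades → Spec_calculate_streak_stats trades (calculate_streak_stats trades)

-- ===== LEMMAS AND PROOFS =====

-- proof-side characterization: the consecutive runs of the list as (value, run length) pairs
def pyGroupby : List Bool → List (Bool × Int)
  | [] => []
  | b :: rest =>
    (b, 1 + ((rest.takeWhile (· == b)).length : Int)) :: pyGroupby (rest.dropWhile (· == b))
  termination_by l => l.length
  decreasing_by simpa using Nat.lt_succ_of_le (List.length_dropWhile_le _ _)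

-- A's loop started on a pending run (b, cs) equals the fold over the runs,
-- with the pending run merged into the runs of the remaining list.
theorem csLoopA_key : ∀ (ts : List Bool) (b : Bool) (cs : Int) (w l : List Int),
    csLoopA ts cs (some b) w l =
      ((b, cs + ((ts.takeWhile (· == b)).length : Int)) :: pyGroupby (ts.dropWhile (· == b))).foldl
        (fun (s : List Int × List Int) kg =>
          if kg.1 then (s.1 ++ [kg.2], s.2) else (s.1, s.2 ++ [kg.2]))
        (w, l) := by
  intro ts
  induction ts with
  | nil =>
    intro b cs w l
    simp [csLoopA]
    cases b <;> simp [pyGroupby]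
  | cons t ts ih =>
    intro b cs w l
    by_cases h : t = b
    · subst h
      have := ih t (cs + 1) w l
      simp [csLoopA, List.takeWhile, List.dropWhile, this]
      ring_nf
    · have hne : (t == b) = false := by simp [h]
      rw [show (t :: ts).takeWhile (· == b) = [] by simp [List.takeWhile, hne],
          show (t :: ts).dropWhile (· == b) = t :: ts by simp [List.dropWhile, hne]]
      rw [show pyGroupby (t :: ts)
            = (t, 1 + ((ts.takeWhile (· == t)).length : Int)) :: pyGroupby (ts.dropWhile (· == t))
          from by simp [pyGroupby]]
      cases b
      · simp [csLoopA, hne, ih]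
      · simp [csLoopA, hne, ih]

-- the fold over the runs IS the pair (winning lengths, losing lengths)
theorem foldl_split : ∀ (rs : List (Bool × Int)) (w l : List Int),
    rs.foldl (fun (s : List Int × List Int) kg =>
        if kg.1 then (s.1 ++ [kg.2], s.2) else (s.1, s.2 ++ [kg.2])) (w, l)
      = (w ++ (rs.filter (fun p => p.1)).map (fun p => p.2),
         l ++ (rs.filter (fun p => !p.1)).map (fun p => p.2)) := by
  intro rs
  induction rs with
  | nil => simp
  | cons r rs ih =>
    intro w l
    cases hb : r.1 <;> simp [ih, hb]

theorem A_char (trades : List Bool) :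
    calculate_streak_stats trades =
      [("winning", ((pyGroupby trades).filter (fun p => p.1)).map (fun p => p.2)),
       ("losing",  ((pyGroupby trades).filter (fun p => !p.1)).map (fun p => p.2))] := by
  cases trades with
  | nil => simp [calculate_streak_stats, csLoopA, pyGroupby]
  | cons t ts =>
    simp only [calculate_streak_stats, csLoopA, csLoopA_key, foldl_split]
    rw [show pyGroupby (t :: ts)
          = (t, 1 + ((ts.takeWhile (· == t)).length : Int)) :: pyGroupby (ts.dropWhile (· == t))
        from by simp [pyGroupby]]
    simp

-- ---- B-side lemmas ----

theorem pyRange_shift (k m : Nat) :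
    PySem.List.pyRange (k : Int) ((k : Int) + (m : Int)) =
      (PySem.List.pyRange 0 (m : Int)).map (fun x => x + (k : Int)) := by
  induction m with
  | zero =>
    have h1 : PySem.List.pyRange (k : Int) ((k : Int) + ((0 : Nat) : Int)) = [] := by
      rw [List.eq_nil_iff_forall_not_mem]
      intro x hx
      rw [PySem.List.mem_pyRange_one] at hx
      omega
    have h2 : PySem.List.pyRange 0 ((0 : Nat) : Int) = [] := by
      rw [List.eq_nil_iff_forall_not_mem]
      intro x hx
      rw [PySem.List.mem_pyRange_one] at hx
      omega
    rw [h1, h2]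
    rfl
  | succ m ih =>
    have h1 : ((k : Int) + ((m + 1 : Nat) : Int)) = ((k : Int) + (m : Int)) + 1 := by push_cast; ring
    have h2 : (((m + 1 : Nat)) : Int) = ((m : Int)) + 1 := by push_cast; ring
    rw [h1, h2, PySem.List.pyRange_one_succ_right (by omega),
        PySem.List.pyRange_one_succ_right (by omega), List.map_append, ih]
    simp [add_comm]

theorem getD_shift (xs ys : List Bool) (j : Int) (hj : 0 ≤ j) :
    PySem.List.pyGetD (xs ++ ys) (j + (xs.length : Int)) false = PySem.List.pyGetD ys j false := by
  obtain ⟨jn, rfl⟩ := Int.eq_ofNat_of_zero_le hj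
  have h : ((jn : Int) + (xs.length : Int)) = (((xs.length + jn : Nat)) : Int) := by push_cast; ring
  rw [h, PySem.List.pyGetD_natCast, PySem.List.pyGetD_natCast,
      List.getD_append_right _ _ _ _ (by omega)]
  congr 1
  omega

theorem getD_run (xs ys : List Bool) (b : Bool) (hall : ∀ x ∈ xs, x = b) (j : Int)
    (h0 : 0 ≤ j) (h1 : j < (xs.length : Int)) :
    PySem.List.pyGetD (xs ++ ys) j false = b := by
  have hlen : j < ((xs ++ ys).length : Int) := by simp; omega
  rw [PySem.List.pyGetD_eq_getElem _ _ h0 hlen]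
  have hj : j.toNat < xs.length := by omega
  rw [List.getElem_append_left hj]
  exact hall _ (List.getElem_mem hj)

-- the boundary comprehension over a leading constant run: it keeps 0 and shifts the rest
theorem bounds_split (b : Bool) (run rest : List Bool) (hall : ∀ x ∈ run, x = b)
    (hkpos : 1 ≤ run.length) (hhead : ∀ h : rest ≠ [], ((rest.head h) == b) = false) :
    bBounds (run ++ rest) = 0 :: (bBounds rest).map (fun x => x + (run.length : Int)) := by
  have hn : (((run ++ rest).length : Nat) : Int) = (run.length : Int) + (rest.length : Int) := by
    rw [List.length_append]; push_cast; ring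
  unfold bBounds bStarts
  rw [hn, PySem.List.pyRange_one_append 0 (run.length : Int) _ (by omega) (by omega)]
  rw [List.filter_append]
  have hfirst : (PySem.List.pyRange 0 (run.length : Int)).filter
      (fun i => (i == 0 || !(PySem.List.pyGetD (run ++ rest) i false
                              == PySem.List.pyGetD (run ++ rest) (i - 1) false))) = [0] := by
    rw [PySem.List.pyRange_one_cons (by omega)]
    rw [List.filter_cons]
    have h0 : (((0 : Int) == 0 || !(PySem.List.pyGetD (run ++ rest) 0 false
                  == PySem.List.pyGetD (run ++ rest) (0 - 1) false))) = true := by simp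
    rw [h0]
    have htail : (PySem.List.pyRange (0 + 1) (run.length : Int)).filter
        (fun i => (i == 0 || !(PySem.List.pyGetD (run ++ rest) i false
                                == PySem.List.pyGetD (run ++ rest) (i - 1) false))) = [] := by
      rw [List.filter_eq_nil_iff]
      intro i hi
      rw [PySem.List.mem_pyRange_one] at hi
      have hi0 : (i == (0 : Int)) = false := by simp; omega
      have hgi : PySem.List.pyGetD (run ++ rest) i false = b :=
        getD_run _ _ _ hall i (by omega) (by omega)
      have hgi' : PySem.List.pyGetD (run ++ rest) (i - 1) false = b :=
        getD_run _ _ _ hall (i - 1) (by omega) (by omega)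
      rw [hi0, hgi, hgi']
      simp
    rw [htail]
    rfl
  have hsecond : (PySem.List.pyRange (run.length : Int) ((run.length : Int) + (rest.length : Int))).filter
      (fun i => (i == 0 || !(PySem.List.pyGetD (run ++ rest) i false
                              == PySem.List.pyGetD (run ++ rest) (i - 1) false)))
      = (bStarts rest).map (fun x => x + (run.length : Int)) := by
    rw [pyRange_shift, List.filter_map]
    unfold bStarts
    congr 1
    apply List.filter_congr
    intro j hj
    rw [PySem.List.mem_pyRange_one] at hj
    simp only [Function.comp_apply]
    have hrestne : rest ≠ [] := by
      intro h; rw [h] at hj; simp at hj; omega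
    have hj0 : ((j + (run.length : Int)) == (0 : Int)) = false := by simp; omega
    have hga : PySem.List.pyGetD (run ++ rest) (j + (run.length : Int)) false
        = PySem.List.pyGetD rest j false := getD_shift _ _ _ (by omega)
    by_cases hjz : j = 0
    · subst hjz
      have hgb : PySem.List.pyGetD (run ++ rest) ((0 : Int) + (run.length : Int) - 1) false = b :=
        getD_run _ _ _ hall _ (by omega) (by omega)
      have hpos : 0 < rest.length := by omega
      have hg0 : PySem.List.pyGetD rest 0 false = rest.head hrestne := by
        rw [PySem.List.pyGetD_eq_getElem _ _ (by omega) (by exact_mod_cast hj.2)]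
        exact List.getElem_zero hpos
      rw [hga, hgb, hj0, hg0]
      simp [hhead hrestne]
    · have hgb : PySem.List.pyGetD (run ++ rest) (j + (run.length : Int) - 1) false
          = PySem.List.pyGetD rest (j - 1) false := by
        rw [show j + (run.length : Int) - 1 = (j - 1) + (run.length : Int) by ring]
        exact getD_shift _ _ _ (by omega)
      have hjz' : (j == (0 : Int)) = false := by simp; omega
      rw [hga, hgb, hj0, hjz']
  rw [hfirst, hsecond]
  unfold bStarts
  rw [List.map_append]
  simp [add_comm]

theorem bBounds_cons (b : Bool) (ts : List Bool) :
    bBounds (b :: ts) =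
      0 :: (bBounds (ts.dropWhile (· == b))).map
        (fun x => x + (((b :: ts.takeWhile (· == b)).length : Nat) : Int)) := by
  have hsplit : b :: ts = (b :: ts.takeWhile (· == b)) ++ ts.dropWhile (· == b) := by
    simp
  rw [hsplit]
  apply bounds_split
  · intro x hx
    rcases List.mem_cons.1 hx with h | h
    · exact h
    · simpa using List.mem_takeWhile_imp h
  · simp
  · intro h
    exact List.head_dropWhile_not (fun x => x == b) h

theorem bBounds_form (xs : List Bool) : bBounds xs = 0 :: (bBounds xs).tail := by
  cases xs with
  | nil => rfl
  | cons b ts => rw [bBounds_cons, List.tail_cons]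

theorem bBounds_nonneg (xs : List Bool) : ∀ x ∈ bBounds xs, 0 ≤ x := by
  intro x hx
  unfold bBounds at hx
  rcases List.mem_append.1 hx with h | h
  · unfold bStarts at h
    have := List.mem_of_mem_filter h
    rw [PySem.List.mem_pyRange_one] at this
    omega
  · simp at h; omega

theorem bRuns_cons (b : Bool) (ts : List Bool) :
    bRuns (b :: ts) =
      ((0 : Int), (((b :: ts.takeWhile (· == b)).length : Nat) : Int)) ::
        (bRuns (ts.dropWhile (· == b))).map
          (fun p => (p.1 + (((b :: ts.takeWhile (· == b)).length : Nat) : Int),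
                     p.2 + (((b :: ts.takeWhile (· == b)).length : Nat) : Int))) := by
  unfold bRuns
  rw [bBounds_cons b ts, bBounds_form (ts.dropWhile (· == b))]
  rw [List.map_cons, List.tail_cons, List.zip_cons_cons]
  rw [show ((fun x => x + (((b :: ts.takeWhile (· == b)).length : Nat) : Int)) 0
        :: ((bBounds (ts.dropWhile (· == b))).tail).map
             (fun x => x + (((b :: ts.takeWhile (· == b)).length : Nat) : Int)))
      = ((0 :: (bBounds (ts.dropWhile (· == b))).tail).map
          (fun x => x + (((b :: ts.takeWhile (· == b)).length : Nat) : Int))) from by rw [List.map_cons]]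
  rw [List.zip_map, List.tail_cons, zero_add]
  rw [List.map_congr_left
        (g := fun p : Int × Int =>
          (p.1 + (((b :: ts.takeWhile (· == b)).length : Nat) : Int),
           p.2 + (((b :: ts.takeWhile (· == b)).length : Nat) : Int)))
        (by intro p _; simp [Prod.map])]

theorem bPairs_aux : ∀ (n : Nat) (xs : List Bool), xs.length ≤ n →
    (bRuns xs).map (fun p => (PySem.List.pyGetD xs p.1 false, p.2 - p.1)) = pyGroupby xs := by
  intro n
  induction n with
  | zero =>
    intro xs hx
    have hxs : xs = [] := by cases xs <;> simp_all
    subst hxs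
    have hnil : bRuns [] = [] := by decide
    simp [hnil, pyGroupby]
  | succ n ih =>
    intro xs hx
    cases xs with
    | nil =>
      have hnil : bRuns [] = [] := by decide
      simp [hnil, pyGroupby]
    | cons b ts =>
      have hsplit : b :: ts = (b :: ts.takeWhile (· == b)) ++ ts.dropWhile (· == b) := by
        simp
      rw [bRuns_cons, List.map_cons, List.map_map]
      have hhead : (PySem.List.pyGetD (b :: ts) 0 false,
            (((b :: ts.takeWhile (· == b)).length : Nat) : Int) - 0)
          = (b, 1 + ((ts.takeWhile (· == b)).length : Int)) := by
        rw [Prod.mk.injEq]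
        constructor
        · rw [PySem.List.pyGetD_eq_getElem _ _ (by omega) (by simp)]
          rfl
        · simp [List.length_cons]
          ring
      have htail : (bRuns (ts.dropWhile (· == b))).map
            ((fun p => (PySem.List.pyGetD (b :: ts) p.1 false, p.2 - p.1)) ∘
              (fun p => (p.1 + (((b :: ts.takeWhile (· == b)).length : Nat) : Int),
                         p.2 + (((b :: ts.takeWhile (· == b)).length : Nat) : Int))))
          = (bRuns (ts.dropWhile (· == b))).map
              (fun p => (PySem.List.pyGetD (ts.dropWhile (· == b)) p.1 false, p.2 - p.1)) := by
        apply List.map_congr_left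
        intro p hp
        obtain ⟨a, c⟩ := p
        have hp1 : a ∈ bBounds (ts.dropWhile (· == b)) := (List.of_mem_zip hp).1
        have hp1n : 0 ≤ a := bBounds_nonneg _ _ hp1
        simp only [Function.comp_apply]
        rw [Prod.mk.injEq]
        constructor
        · rw [hsplit]
          exact getD_shift _ _ _ hp1n
        · ring
      have hlen : (ts.dropWhile (· == b)).length ≤ n := by
        have := List.length_dropWhile_le (· == b) ts
        simp at hx
        omega
      rw [htail, ih _ hlen, hhead]
      rw [show pyGroupby (b :: ts)
            = (b, 1 + ((ts.takeWhile (· == b)).length : Int)) :: pyGroupby (ts.dropWhile (· == b))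
          from by simp [pyGroupby]]

theorem bPairs_char (xs : List Bool) :
    (bRuns xs).map (fun p => (PySem.List.pyGetD xs p.1 false, p.2 - p.1)) = pyGroupby xs :=
  bPairs_aux xs.length xs le_rfl

theorem B_list_char (xs : List Bool) (q : Bool) :
    ((bRuns xs).filter (fun p => (PySem.List.pyGetD xs p.1 false) == q)).map (fun p => p.2 - p.1)
      = ((pyGroupby xs).filter (fun p => p.1 == q)).map (fun p => p.2) := by
  have h := bPairs_char xs
  calc ((bRuns xs).filter (fun p => (PySem.List.pyGetD xs p.1 false) == q)).map (fun p => p.2 - p.1)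
      = List.map (fun r : Bool × Int => r.2)
          (List.filter (fun r : Bool × Int => r.1 == q)
            ((bRuns xs).map (fun p => (PySem.List.pyGetD xs p.1 false, p.2 - p.1)))) := by
        rw [List.filter_map, List.map_map]
        rfl
    _ = ((pyGroupby xs).filter (fun p => p.1 == q)).map (fun p => p.2) := by rw [h]

-- ===== VERDICT (by name: the statement is the Claim_ definition above) =====
theorem calculate_streak_stats_spec : Claim_equal_calculate_streak_stats := by
  intro trades _
  show _ = _
  rw [A_char, calculate_streak_stats_alt]
  have hw := B_list_char trades true
  have hl := B_list_char trades false
  simp only [beq_true, beq_false] at hw hl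
  rw [hw, hl]
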